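-- pv_equiv track=rewrite | github.com/andreymal/mini_fiction | mini_fiction/logic/adminlog.py | _generate_change_message
-- ===== SOURCE A (Python) =====
-- from typing import Collection, Dict, List, Optional, Tuple, Union, TypedDict
--
-- def _generate_change_message(fields: Collection[str]) -> str:
--     msg = ["Изменен "]
--     for index, field in enumerate(fields):
--         if index > 0:
--             msg.append(" и " if index == len(fields) - 1 else ", ")
--         msg.append(field)
--     msg.append(".")
--     return "".join(msg)
-- ===== SOURCE B (Python) =====
-- def _generate_change_message(fields):
--     items = list(fields)
--     if not items:
--         body = ""
--     elif len(items) == 1: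
--         body = items[0]
--     else:
--         body = "".join([", ".join(items[:-1]), " и ", items[-1]])
--     return "".join(["Изменен ", body, "."])
-- ===== Notes on version B (the rewrite author's own statement) =====
-- stated objective: simpler
-- what changed: Replaces the per-iteration index/length separator branching inside the loop by explicit empty/single cases plus a ', '-join of all but the last element and one ' и ' append.
import Mathlib
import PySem

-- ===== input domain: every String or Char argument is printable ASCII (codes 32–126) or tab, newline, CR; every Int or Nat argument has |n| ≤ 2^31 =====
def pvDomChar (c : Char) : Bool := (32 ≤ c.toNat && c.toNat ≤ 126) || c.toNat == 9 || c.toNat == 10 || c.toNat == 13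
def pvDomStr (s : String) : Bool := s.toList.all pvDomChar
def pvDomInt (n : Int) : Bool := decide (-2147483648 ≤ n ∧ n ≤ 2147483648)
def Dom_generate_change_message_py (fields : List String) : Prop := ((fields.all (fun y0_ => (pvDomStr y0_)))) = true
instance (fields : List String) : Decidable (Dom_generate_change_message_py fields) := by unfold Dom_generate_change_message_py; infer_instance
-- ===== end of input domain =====

set_option maxHeartbeats 1000000


-- B replaces the in-loop index/length separator branching by explicit cases and a ", "-join of all but the last element (same cost, simpler).

-- ===== PORT A =====
def generate_change_message_py (fields : List String) : String :=
  PySem.Str.join ""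
    (((PySem.List.enumerate fields 0).foldl
      (fun msg p =>
        (if 0 < p.1 then
          msg ++ [if p.1 == ((fields.length : Int) - 1) then " и " else ", "]
        else msg) ++ [p.2])
      ["Изменен "]) ++ ["."])

-- ===== PORT B =====
def generate_change_message_py_alt (fields : List String) : String :=
  PySem.Str.join ""
    ["Изменен ",
     (match fields with
      | [] => ""
      | [x] => x
      | _ => PySem.Str.join ""
               [PySem.Str.join ", " (PySem.List.slice fields none (some (-1))),
                " и ",
                PySem.List.pyGetD fields (-1) ""]),
     "."]

-- ===== PRECONDITION & SPEC =====
def Spec_generate_change_message_py (fields : List String) (out : String) : Prop := out = generate_change_message_py_alt fields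
instance (fields : List String) (out : String) : Decidable (Spec_generate_change_message_py fields out) := by unfold Spec_generate_change_message_py; infer_instance

-- ===== CLAIM (what is proved, stated in full; the proofs are below) =====
def Claim_equal_generate_change_message_py : Prop := ∀ (fields : List String), Dom_generate_change_message_py fields → Spec_generate_change_message_py fields (generate_change_message_py fields)

-- ===== LEMMAS AND PROOFS =====

-- separator-prefixed tail: each element of l prefixed by ", ", except the last by " и "
def sepTail : List String → List String
  | [] => []
  | z :: zs => (if zs.isEmpty then " и " else ", ") :: z :: sepTail zs

-- the loop of A over indices ≥ 1 produces exactly acc ++ sepTail l (N = index of the last element)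
theorem foldA (N : Int) (l : List String) (s : Int) (h1 : 1 ≤ s)
    (hN : s + (l.length : Int) - 1 = N) (acc : List String) :
    (PySem.List.enumerate l s).foldl
      (fun msg p =>
        (if 0 < p.1 then
          msg ++ [if p.1 == N then " и " else ", "]
        else msg) ++ [p.2]) acc
    = acc ++ sepTail l := by
  induction l generalizing s acc with
  | nil => simp [PySem.List.enumerate_nil, sepTail]
  | cons z zs ih =>
    rw [PySem.List.enumerate_cons]
    simp only [List.foldl_cons]
    have h0 : (0:Int) < s := by omega
    cases zs with
    | nil =>
      have hb : (s == N) = true := by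
        simp only [List.length_cons, List.length_nil] at hN
        simp; omega
      simp [PySem.List.enumerate_nil, sepTail, h0, hb]
    | cons w ws =>
      have hb : (s == N) = false := by
        simp only [List.length_cons] at hN
        simp; push_cast at hN; omega
      rw [ih (s + 1) (by omega)
          (by simp only [List.length_cons] at hN ⊢; push_cast at hN ⊢; omega)]
      simp [sepTail, h0, hb]

theorem joinNilFlatten (l : List (List Char)) :
    PySem.Chars.join [] l = l.flatten := by
  induction l with
  | nil => simp [PySem.Chars.join_nil]
  | cons a rest ih =>
    cases rest with
    | nil => simp [PySem.Chars.join_singleton]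
    | cons b r =>
      rw [PySem.Chars.join_cons_cons]
      simp [ih]

theorem pyGetD_neg_one_cons (x : String) (l : List String) (h : l ≠ []) :
    PySem.List.pyGetD (x :: l) (-1) "" = PySem.List.pyGetD l (-1) "" := by
  rw [PySem.List.pyGetD_neg_one (x :: l) "" (List.cons_ne_nil x l),
      PySem.List.pyGetD_neg_one l "" h]
  exact List.getLast_cons h

theorem bodyEq (x : String) (l : List String) (h : l ≠ []) (tail : List Char) :
    x.toList ++ ((List.map String.toList (sepTail l)).flatten ++ tail)
    = PySem.Chars.join (", ".toList) (List.map String.toList ((x :: l).dropLast))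
        ++ (" и ".toList ++ ((PySem.List.pyGetD l (-1) "").toList ++ tail)) := by
  induction l generalizing x with
  | nil => exact absurd rfl h
  | cons z zs ih =>
    cases zs with
    | nil =>
      have e : PySem.List.pyGetD [z] (-1) "" = z := by
        rw [PySem.List.pyGetD_neg_one [z] "" (List.cons_ne_nil z [])]; rfl
      rw [e]
      simp [sepTail, PySem.Chars.join_singleton]
    | cons w ws =>
      rw [pyGetD_neg_one_cons z (w :: ws) (by simp)]
      have hd : (x :: z :: w :: ws).dropLast = x :: (z :: w :: ws).dropLast := by simp
      rw [hd]
      have hmap : List.map String.toList (x :: (z :: w :: ws).dropLast)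
          = x.toList :: List.map String.toList ((z :: w :: ws).dropLast) := by simp
      rw [hmap]
      have hd2 : (z :: w :: ws).dropLast = z :: (w :: ws).dropLast := by simp
      have hcc : PySem.Chars.join (", ".toList)
            (x.toList :: List.map String.toList ((z :: w :: ws).dropLast))
          = x.toList ++ ", ".toList ++ PySem.Chars.join (", ".toList)
              (List.map String.toList ((z :: w :: ws).dropLast)) := by
        rw [hd2]
        simp only [List.map_cons]
        rw [PySem.Chars.join_cons_cons]
      rw [hcc, List.append_assoc, List.append_assoc, ← ih z (by simp)]
      simp [sepTail]

-- A on a nonempty list, characterised via sepTail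
theorem A_cons (x : String) (l : List String) :
    generate_change_message_py (x :: l)
    = PySem.Str.join "" ((["Изменен ", x] ++ sepTail l) ++ ["."]) := by
  unfold generate_change_message_py
  rw [PySem.List.enumerate_cons]
  simp only [List.foldl_cons, lt_self_iff_false, if_false]
  rw [foldA (((x :: l).length : Int) - 1) l ((0:Int) + 1) (by omega)
      (by simp only [List.length_cons]; push_cast; omega)]
  simp

-- ===== VERDICT (by name: the statement is the Claim_ definition above) =====
theorem generate_change_message_py_spec : Claim_equal_generate_change_message_py := by
  unfold Claim_equal_generate_change_message_py
  intro fields _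
  unfold Spec_generate_change_message_py
  obtain _ | ⟨x, _ | ⟨z, zs⟩⟩ := fields
  · decide
  · rw [← String.toList_inj, A_cons]
    unfold generate_change_message_py_alt
    simp [PySem.Str.toList_join, show ("".toList : List Char) = [] from rfl,
      joinNilFlatten, sepTail]
  · rw [← String.toList_inj, A_cons]
    unfold generate_change_message_py_alt
    rw [PySem.List.slice_to_neg_one]
    rw [pyGetD_neg_one_cons x (z :: zs) (by simp)]
    simp [PySem.Str.toList_join, show ("".toList : List Char) = [] from rfl,
      joinNilFlatten, bodyEq x (z :: zs) (List.cons_ne_nil z zs), List.append_assoc]
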